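-- pv_equiv track=rewrite | github.com/dev-dull/advent_of_code | 2023/day13/challenge.py | find_reflection_intersection
-- ===== SOURCE A (Python) =====
-- def find_reflection_intersection(mirror_grid):
--     for i, row in enumerate(mirror_grid[0:-1]):
--         if mirror_grid[i] == mirror_grid[i + 1]:
--             sub_side = i - 1
--             add_side = i + 2
--             mirrored = True
--             while sub_side+1 and len(mirror_grid) - add_side:
--                 if mirror_grid[sub_side] == mirror_grid[add_side]:
--                     sub_side -= 1
--                     add_side += 1
--                 else:
--                     mirrored = False
--                     break
--
--             if mirrored:
--                 return i, i + 1
-- ===== SOURCE B (Python) =====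
-- def find_reflection_intersection(mirror_grid):
--     # Manacher's algorithm on even centers: compute, for every cut c (between
--     # rows c-1 and c), the maximal reflection radius d[c], reusing mirrored
--     # radii; a reflection line exists at c iff d[c] reaches an edge.
--     n = len(mirror_grid)
--     d = [0] * n
--     l = r = 0
--     for c in range(1, n):
--         k = min(r - c, d[l + r - c]) if c < r else 0
--         while k < c and c + k < n and mirror_grid[c - k - 1] == mirror_grid[c + k]:
--             k += 1
--         d[c] = k
--         if c + k > r:
--             l, r = c - k, c + k
--     for c in range(1, n):
--         if d[c] == min(c, n - c):
--             return c - 1, c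
--     return None
-- ===== Notes on version B (the rewrite author's own statement) =====
-- stated objective: alternative
-- what changed: Replaced A's per-candidate outward two-pointer expansion by Manacher's algorithm: one left-to-right pass computes every even-center reflection radius (reusing mirrored radii inside the rightmost known palindrome window), then the first radius reaching an edge gives the answer.
import Mathlib
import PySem

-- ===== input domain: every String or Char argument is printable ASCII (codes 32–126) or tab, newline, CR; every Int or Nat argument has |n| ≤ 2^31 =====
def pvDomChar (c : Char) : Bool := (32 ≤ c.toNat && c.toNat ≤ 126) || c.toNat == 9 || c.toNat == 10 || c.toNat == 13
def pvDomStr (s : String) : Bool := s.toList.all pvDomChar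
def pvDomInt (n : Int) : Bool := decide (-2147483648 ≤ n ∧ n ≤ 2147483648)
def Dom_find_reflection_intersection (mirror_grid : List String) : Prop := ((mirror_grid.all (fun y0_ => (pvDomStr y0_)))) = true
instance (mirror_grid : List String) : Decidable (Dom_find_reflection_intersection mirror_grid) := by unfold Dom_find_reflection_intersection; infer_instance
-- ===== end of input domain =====

-- B replaces A's per-candidate outward expansion by Manacher's algorithm on even centers:
-- one left-to-right pass computes every reflection radius, reusing mirrored radii inside
-- the rightmost known palindrome window, then the first radius reaching an edge is
-- returned (objective: alternative algorithm).

-- ===== PORT A =====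
-- the while loop; fuel = g.length bounds its iteration count (add_side grows towards len),
-- so the fuel never runs out on the calls pvForA makes
def pvWhileA (g : List String) : Nat → Int → Int → Bool
  | 0, _, _ => true
  | fuel + 1, sub, add =>
    if sub + 1 ≠ 0 ∧ ((g.length : Int) - add) ≠ 0 then
      if PySem.List.pyGet? g sub = PySem.List.pyGet? g add then
        pvWhileA g fuel (sub - 1) (add + 1)
      else false
    else true

-- 'for i, row in enumerate(mirror_grid[0:-1])' with early return: i runs over 0 .. len-2
def pvForA (g : List String) (i : Nat) : Option (Int × Int) :=
  if i < g.length - 1 then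
    if PySem.List.pyGet? g (i : Int) = PySem.List.pyGet? g ((i : Int) + 1) then
      if pvWhileA g g.length ((i : Int) - 1) ((i : Int) + 2) then
        some ((i : Int), (i : Int) + 1)
      else pvForA g (i + 1)
    else pvForA g (i + 1)
  else none
termination_by g.length - 1 - i

def find_reflection_intersection (mirror_grid : List String) : Option (Int × Int) :=
  pvForA mirror_grid 0

-- ===== PORT B =====
-- Manacher's inner while loop: extend radius k at cut c while the next pair of rows matches.
-- The guards keep both indices in range, so getElem? equality is exactly Python's row equality.
def pvExtend (g : List String) (c k : Nat) : Nat :=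
  if h : k < c ∧ c + k < g.length ∧ g[c - k - 1]? = g[c + k]? then
    pvExtend g c (k + 1)
  else k
termination_by g.length - (c + k)
decreasing_by omega

-- one iteration of the main for-loop: state (d, l, r)
def pvStep (g : List String) (st : List Nat × Nat × Nat) (c : Nat) : List Nat × Nat × Nat :=
  let d := st.1
  let l := st.2.1
  let r := st.2.2
  let k0 := if c < r then min (r - c) (d.getD (l + r - c) 0) else 0
  let k := pvExtend g c k0
  let d' := d.set c k
  if r < c + k then (d', c - k, c + k) else (d', l, r)

def find_reflection_intersection_alt (mirror_grid : List String) : Option (Int × Int) :=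
  let n := mirror_grid.length
  let st := (List.range' 1 (n - 1)).foldl (pvStep mirror_grid) (List.replicate n 0, 0, 0)
  (List.range' 1 (n - 1)).findSome? fun c =>
    if st.1.getD c 0 = min c (n - c) then some ((c : Int) - 1, (c : Int)) else none

-- ===== PRECONDITION & SPEC =====
def Spec_find_reflection_intersection (mirror_grid : List String) (out : Option (Int × Int)) : Prop := out = find_reflection_intersection_alt mirror_grid
instance (mirror_grid : List String) (out : Option (Int × Int)) : Decidable (Spec_find_reflection_intersection mirror_grid out) := by unfold Spec_find_reflection_intersection; infer_instance

-- ===== CLAIM (what is proved, stated in full; the proofs are below) =====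
def Claim_equal_find_reflection_intersection : Prop := ∀ (mirror_grid : List String), Dom_find_reflection_intersection mirror_grid → Spec_find_reflection_intersection mirror_grid (find_reflection_intersection mirror_grid)

-- ===== LEMMAS AND PROOFS =====

-- "the k pairs of rows around cut c match" (with the bounds that make the indices honest)
def pvMk (g : List String) (c k : Nat) : Prop :=
  k ≤ c ∧ c + k ≤ g.length ∧ ∀ j < k, g[c - 1 - j]? = g[c + j]?

-- the true (naive) reflection radius at cut c
def pvR (g : List String) (c : Nat) : Nat := pvExtend g c 0

theorem pvExtend_mk (g : List String) (c k : Nat) (h : pvMk g c k) :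
    pvMk g c (pvExtend g c k) := by
  fun_induction pvExtend g c k with
  | case1 k hc ih =>
    apply ih
    obtain ⟨h1, h2, h3⟩ := h
    refine ⟨by omega, by omega, ?_⟩
    intro j hj
    by_cases hjk : j < k
    · exact h3 j hjk
    · have : j = k := by omega
      subst this
      have : c - 1 - j = c - j - 1 := by omega
      rw [this]
      exact hc.2.2
  | case2 k hc => exact h

theorem pvExtend_eq_of_mk (g : List String) (c k : Nat) (h : pvMk g c k) :
    pvExtend g c k = pvR g c := by
  induction k with
  | zero => rfl
  | succ k ih =>
    obtain ⟨h1, h2, h3⟩ := h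
    have hmk : pvMk g c k := ⟨by omega, by omega, fun j hj => h3 j (by omega)⟩
    have hstep : pvExtend g c k = pvExtend g c (k + 1) := by
      rw [pvExtend.eq_def]
      rw [dif_pos]
      refine ⟨by omega, by omega, ?_⟩
      have : c - k - 1 = c - 1 - k := by omega
      rw [this]
      exact h3 k (by omega)
    rw [← hstep, ih hmk]

theorem pvMk_mono (g : List String) (c k j : Nat) (h : pvMk g c k) (hj : j ≤ k) :
    pvMk g c j :=
  ⟨by have := h.1; have := h.2.1; omega, by have := h.1; have := h.2.1; omega, fun j' hj' => h.2.2 j' (by have := h.1; have := h.2.1; omega)⟩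

-- R c = min c (n-c)  ⟺  the reflection at cut c reaches an edge
theorem pvR_eq_min_iff (g : List String) (c : Nat) (hc : c ≤ g.length) :
    pvR g c = min c (g.length - c) ↔ pvMk g c (min c (g.length - c)) := by
  constructor
  · intro h
    have := pvExtend_mk g c 0 ⟨by omega, by omega, by omega⟩
    rw [pvR] at h
    rw [← h]
    exact this
  · intro h
    have h1 : pvExtend g c (min c (g.length - c)) = pvR g c := pvExtend_eq_of_mk g c _ h
    have h2 : pvExtend g c (min c (g.length - c)) = min c (g.length - c) := by
      rw [pvExtend.eq_def, dif_neg]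
      intro hcon
      omega
    omega

theorem pvMk_sym (g : List String) (m rm : Nat) (h : pvMk g m rm) :
    ∀ x, m - rm ≤ x → x < m + rm → g[x]? = g[2 * m - 1 - x]? := by
  obtain ⟨h1, h2, h3⟩ := h
  intro x hx1 hx2
  by_cases hxm : m ≤ x
  · have := h3 (x - m) (by omega)
    have e1 : m - 1 - (x - m) = 2 * m - 1 - x := by omega
    have e2 : m + (x - m) = x := by omega
    rw [e1, e2] at this
    exact this.symm
  · have := h3 (m - 1 - x) (by omega)
    have e1 : m - 1 - (m - 1 - x) = x := by omega
    have e2 : m + (m - 1 - x) = 2 * m - 1 - x := by omega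
    rw [e1, e2] at this
    exact this

-- mirror lemma: inside a known even palindrome window centered at m, the first k pairs
-- around a later cut c match whenever they match around the mirrored cut 2m - c
theorem pvMk_mirror (g : List String) (m rm c k : Nat)
    (hpal : pvMk g m rm) (hmc : m < c) (hck : c + k ≤ m + rm)
    (hmir : pvMk g (2 * m - c) k) : pvMk g c k := by
  have hrm : rm ≤ m := hpal.1
  have hn : m + rm ≤ g.length := hpal.2.1
  have hkc' : k ≤ 2 * m - c := hmir.1
  refine ⟨by omega, by omega, ?_⟩
  intro j hj
  have hx1 : g[c + j]? = g[2 * m - 1 - (c + j)]? :=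
    pvMk_sym g m rm hpal (c + j) (by omega) (by omega)
  have hx2 : g[c - 1 - j]? = g[2 * m - 1 - (c - 1 - j)]? :=
    pvMk_sym g m rm hpal (c - 1 - j) (by omega) (by omega)
  have hmirj := hmir.2.2 j hj
  have e1 : 2 * m - 1 - (c + j) = 2 * m - c - 1 - j := by omega
  have e2 : 2 * m - 1 - (c - 1 - j) = 2 * m - c + j := by omega
  rw [e1] at hx1
  rw [e2] at hx2
  rw [hx1, hx2, hmirj]

-- the loop invariant after processing cuts 1 .. c-1
def pvInv (g : List String) (c : Nat) (st : List Nat × Nat × Nat) : Prop :=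
  st.1.length = g.length ∧
  (∀ t, 1 ≤ t → t < c → st.1.getD t 0 = pvR g t) ∧
  ((st.2.1 = 0 ∧ st.2.2 = 0) ∨
    ∃ m, 1 ≤ m ∧ m < c ∧ st.2.1 = m - pvR g m ∧ st.2.2 = m + pvR g m)

theorem pvMk_R (g : List String) (c : Nat) (hc : c ≤ g.length) : pvMk g c (pvR g c) :=
  pvExtend_mk g c 0 ⟨by omega, by omega, by omega⟩

theorem pvStep_inv (g : List String) (c : Nat) (st : List Nat × Nat × Nat)
    (hinv : pvInv g c st) (hc1 : 1 ≤ c) (hcn : c < g.length) :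
    pvInv g (c + 1) (pvStep g st c) := by
  obtain ⟨d, l, r⟩ := st
  obtain ⟨hd, hprev, hwin⟩ := hinv
  simp only at hd hprev hwin
  have hk0 : pvMk g c (if c < r then min (r - c) (d.getD (l + r - c) 0) else 0) := by
    by_cases hcr : c < r
    · rw [if_pos hcr]
      rcases hwin with ⟨hl0, hr0⟩ | ⟨m, hm1, hmc, hl, hr⟩
      · omega
      · have hmn : m ≤ g.length := by omega
        have hpal : pvMk g m (pvR g m) := pvMk_R g m hmn
        have hrm : pvR g m ≤ m := hpal.1
        have hrn : m + pvR g m ≤ g.length := hpal.2.1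
        have hlr : l + r - c = 2 * m - c := by omega
        have hd' : d.getD (2 * m - c) 0 = pvR g (2 * m - c) := hprev _ (by omega) (by omega)
        rw [hlr, hd']
        have hmir : pvMk g (2 * m - c) (min (r - c) (pvR g (2 * m - c))) :=
          pvMk_mono g _ _ _ (pvMk_R g (2 * m - c) (by omega)) (by omega)
        exact pvMk_mirror g m (pvR g m) c _ hpal (by omega) (by omega) hmir
    · rw [if_neg hcr]
      exact ⟨by omega, by omega, by omega⟩
  have hkR : pvExtend g c (if c < r then min (r - c) (d.getD (l + r - c) 0) else 0) = pvR g c :=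
    pvExtend_eq_of_mk g c _ hk0
  have hRc : pvMk g c (pvR g c) := pvMk_R g c (by omega)
  have hdset : ∀ t, 1 ≤ t → t < c + 1 → (d.set c (pvR g c)).getD t 0 = pvR g t := by
    intro t ht1 ht2
    rw [List.getD_eq_getElem?_getD]
    by_cases htc : t = c
    · subst htc
      rw [List.getElem?_set_self (by omega)]
      rfl
    · rw [List.getElem?_set_ne (by omega)]
      rw [← List.getD_eq_getElem?_getD]
      exact hprev t ht1 (by omega)
  simp only [pvStep, hkR]
  split
  · exact ⟨by simpa using hd, hdset,
      Or.inr ⟨c, by omega, by omega, rfl, rfl⟩⟩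
  · refine ⟨by simpa using hd, hdset, ?_⟩
    rcases hwin with ⟨hl0, hr0⟩ | ⟨m, hm1, hmc, hl, hr⟩
    · exact Or.inl ⟨hl0, hr0⟩
    · exact Or.inr ⟨m, hm1, by omega, hl, hr⟩

theorem pvFold_inv (g : List String) (len s : Nat) (st : List Nat × Nat × Nat)
    (hinv : pvInv g s st) (hs : 1 ≤ s) (hlen : s + len ≤ g.length) :
    pvInv g (s + len) ((List.range' s len).foldl (pvStep g) st) := by
  induction len generalizing s st with
  | zero => simpa using hinv
  | succ len ih =>
    rw [List.range'_succ, List.foldl_cons]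
    have := ih (s + 1) (pvStep g st s) (pvStep_inv g s st hinv hs (by omega)) (by omega) (by omega)
    have e : s + (len + 1) = s + 1 + len := by omega
    rw [e]
    exact this

-- body of B's scan, and of A's loop as established below
def pvBodyB (g : List String) (i : Nat) : Option (Int × Int) :=
  if ((g.take (i + 1)).reverse.zip (g.drop (i + 1))).all (fun p => p.1 == p.2) then
    some ((i : Int), (i : Int) + 1)
  else none

-- A's while loop computes exactly the zip-all check on (take s).reverse vs drop a
theorem pvWhileA_eq_zip (g : List String) (fuel s a : Nat)
    (hsa : s ≤ a) (ha : a ≤ g.length) (hf : min s (g.length - a) ≤ fuel) :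
    pvWhileA g fuel ((s : Int) - 1) (a : Int)
      = ((g.take s).reverse.zip (g.drop a)).all (fun p => p.1 == p.2) := by
  induction fuel generalizing s a with
  | zero =>
    have : s = 0 ∨ a = g.length := by omega
    rcases this with h | h <;> subst h <;> simp [pvWhileA]
  | succ fuel ih =>
    by_cases hs : s = 0
    · subst hs
      have : ((0 : Int) - 1 + 1) = 0 := by ring
      simp [pvWhileA]
    · by_cases hal : a = g.length
      · subst hal
        simp [pvWhileA]
      · have hs1 : s - 1 < g.length := by omega
        have ha1 : a < g.length := by omega
        have hget1 : PySem.List.pyGet? g ((s : Int) - 1) = some g[s - 1] := by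
          have : ((s : Int) - 1) = ((s - 1 : Nat) : Int) := by omega
          rw [this, PySem.List.pyGet?_natCast, List.getElem?_eq_getElem hs1]
        have hget2 : PySem.List.pyGet? g (a : Int) = some g[a] := by
          rw [PySem.List.pyGet?_natCast, List.getElem?_eq_getElem ha1]
        have htake : (g.take s).reverse = g[s - 1] :: (g.take (s - 1)).reverse := by
          conv_lhs => rw [show s = (s - 1) + 1 from by omega]
          rw [List.take_add_one, List.getElem?_eq_getElem hs1]
          simp
        have hdrop : g.drop a = g[a] :: g.drop (a + 1) :=
          List.drop_eq_getElem_cons ha1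
        have hcond : ((s : Int) - 1 + 1 ≠ 0 ∧ ((g.length : Int) - (a : Int)) ≠ 0) := by
          constructor <;> [skip; skip] <;> intro h <;> omega
        rw [htake, hdrop]
        simp only [pvWhileA, if_pos hcond, hget1, hget2, List.zip_cons_cons, List.all_cons]
        by_cases heq : g[s - 1] = g[a]
        · have hrec : ((s : Int) - 1 - 1) = ((s - 1 : Nat) : Int) - 1 := by omega
          have hrec2 : ((a : Int) + 1) = ((a + 1 : Nat) : Int) := by omega
          rw [if_pos (by rw [heq]), hrec, hrec2,
            ih (s - 1) (a + 1) (by omega) (by omega) (by omega)]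
          simp [heq]
        · rw [if_neg (by simpa using heq)]
          simp [beq_eq_false_iff_ne.mpr heq]

-- pvForA from index i equals findSome? of the zip-all body over the remaining range
theorem pvForA_eq_findSome (g : List String) (n i : Nat) (hn : n = g.length - 1 - i) :
    pvForA g i = (List.range' i n).findSome? (pvBodyB g) := by
  induction n generalizing i with
  | zero =>
    rw [pvForA, if_neg (by omega)]
    simp
  | succ n ih =>
    have hi : i < g.length - 1 := by omega
    have hi1 : i < g.length := by omega
    have hi2 : i + 1 < g.length := by omega
    have hget1 : PySem.List.pyGet? g (i : Int) = some g[i] := by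
      rw [PySem.List.pyGet?_natCast, List.getElem?_eq_getElem hi1]
    have hget2 : PySem.List.pyGet? g ((i : Int) + 1) = some g[i + 1] := by
      have : ((i : Int) + 1) = ((i + 1 : Nat) : Int) := by omega
      rw [this, PySem.List.pyGet?_natCast, List.getElem?_eq_getElem hi2]
    have htake : (g.take (i + 1)).reverse = g[i] :: (g.take i).reverse := by
      rw [List.take_add_one, List.getElem?_eq_getElem hi1]; simp
    have hdrop : g.drop (i + 1) = g[i + 1] :: g.drop (i + 2) := by
      exact List.drop_eq_getElem_cons hi2
    have hwhile : pvWhileA g g.length ((i : Int) - 1) ((i : Int) + 2)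
        = ((g.take i).reverse.zip (g.drop (i + 2))).all (fun p => p.1 == p.2) := by
      have h2 : ((i : Int) + 2) = ((i + 2 : Nat) : Int) := by omega
      rw [h2, pvWhileA_eq_zip g g.length i (i + 2) (by omega) (by omega) (by omega)]
    have hbody : pvBodyB g i =
        if (g[i] == g[i + 1]) && ((g.take i).reverse.zip (g.drop (i + 2))).all
            (fun p => p.1 == p.2) then some ((i : Int), (i : Int) + 1) else none := by
      rw [pvBodyB, htake, hdrop]
      simp
    rw [List.range'_succ, List.findSome?_cons]
    rw [pvForA, if_pos hi, hget1, hget2, hwhile]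
    by_cases hc1 : g[i] = g[i + 1]
    · by_cases hc2 : ((g.take i).reverse.zip (g.drop (i + 2))).all (fun p => p.1 == p.2) = true
      · rw [if_pos (by rw [hc1]), if_pos hc2, hbody]
        simp [hc1, hc2]
      · rw [if_pos (by rw [hc1]), if_neg hc2, hbody]
        have : pvBodyB g i = none := by
          rw [hbody]; simp [hc2]
        simp only [hbody.symm, this]
        exact ih (i + 1) (by omega)
    · rw [if_neg (by simpa using hc1)]
      have hb : pvBodyB g i = none := by
        rw [hbody]; simp [beq_eq_false_iff_ne.mpr hc1]
      rw [hb]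
      exact ih (i + 1) (by omega)

-- the zip-all check at line i is the full-radius condition at cut i+1
theorem pvZipall_iff_mk (g : List String) (c : Nat) (h1 : 1 ≤ c) (h2 : c ≤ g.length) :
    (((g.take c).reverse.zip (g.drop c)).all (fun p => p.1 == p.2) = true)
      ↔ pvMk g c (min c (g.length - c)) := by
  have hlen : ((g.take c).reverse.zip (g.drop c)).length = min c (g.length - c) := by
    rw [List.length_zip, List.length_reverse, List.length_take]
    rw [List.length_drop]
    omega
  have hget : ∀ (j : Nat) (hj : j < min c (g.length - c)),
      ((g.take c).reverse.zip (g.drop c))[j]'(by omega) =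
        (g[c - 1 - j]'(by omega), g[c + j]'(by omega)) := by
    intro j hj
    rw [List.getElem_zip]
    congr 1
    · rw [List.getElem_reverse, List.getElem_take]
      congr 1
      simp
      omega
    · rw [List.getElem_drop]
  constructor
  · intro hall
    refine ⟨by omega, by omega, ?_⟩
    intro j hj
    have hj' : j < ((g.take c).reverse.zip (g.drop c)).length := by omega
    have := List.all_eq_true.mp hall _ (List.getElem_mem hj')
    rw [hget j (by omega)] at this
    have heq : g[c - 1 - j]'(by omega) = g[c + j]'(by omega) := by
      simpa using this
    rw [List.getElem?_eq_getElem (by omega : c - 1 - j < g.length),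
        List.getElem?_eq_getElem (by omega : c + j < g.length), heq]
  · intro hmk
    apply List.all_eq_true.mpr
    intro x hx
    obtain ⟨j, hj, rfl⟩ := List.mem_iff_getElem.mp hx
    have hj' : j < min c (g.length - c) := by omega
    rw [hget j hj']
    have := hmk.2.2 j hj'
    rw [List.getElem?_eq_getElem (by omega : c - 1 - j < g.length),
        List.getElem?_eq_getElem (by omega : c + j < g.length)] at this
    simpa using Option.some.inj this

theorem pvFindSome_congr {α β : Type} (l : List α) (f f' : α → Option β)
    (h : ∀ a ∈ l, f a = f' a) : l.findSome? f = l.findSome? f' := by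
  induction l with
  | nil => rfl
  | cons a t ih =>
    rw [List.findSome?_cons, List.findSome?_cons, h a (by simp)]
    cases f' a
    · exact ih fun x hx => h x (by simp [hx])
    · rfl

-- ===== VERDICT (by name: the statement is the Claim_ definition above) =====
theorem find_reflection_intersection_spec : Claim_equal_find_reflection_intersection := by
  intro g _
  show pvForA g 0 =
    (List.range' 1 (g.length - 1)).findSome? fun c =>
      if ((List.range' 1 (g.length - 1)).foldl (pvStep g)
            (List.replicate g.length 0, 0, 0)).1.getD c 0 = min c (g.length - c) then
        some ((c : Int) - 1, (c : Int))
      else none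
  by_cases h0 : g.length ≤ 1
  · have hA : pvForA g 0 = none := by rw [pvForA, if_neg (by omega)]
    have h1 : g.length - 1 = 0 := by omega
    rw [hA, h1]
    rfl
  · have hstart : pvInv g 1 (List.replicate g.length 0, 0, 0) :=
      ⟨by simp, fun t ht1 ht2 => by omega, Or.inl ⟨rfl, rfl⟩⟩
    have hfold := pvFold_inv g (g.length - 1) 1 _ hstart (by omega) (by omega)
    obtain ⟨hlen, hgetD, -⟩ := hfold
    rw [pvForA_eq_findSome g (g.length - 1) 0 (by omega)]
    rw [List.range'_eq_map_range, List.range'_eq_map_range, List.findSome?_map,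
        List.findSome?_map]
    apply pvFindSome_congr
    intro i hi
    have hi' : i < g.length - 1 := List.mem_range.mp hi
    have hgd : ((List.range' 1 (g.length - 1)).foldl (pvStep g)
        (List.replicate g.length 0, 0, 0)).1.getD (1 + i) 0 = pvR g (1 + i) :=
      hgetD (1 + i) (by omega) (by omega)
    have hzip := pvZipall_iff_mk g (i + 1) (by omega) (by omega)
    have hRiff := pvR_eq_min_iff g (i + 1) (by omega)
    rw [List.range'_eq_map_range] at hgd
    show pvBodyB g (0 + i) =
      if (((List.range (g.length - 1)).map (fun x => 1 + x)).foldl (pvStep g)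
            (List.replicate g.length 0, 0, 0)).1.getD (1 + i) 0
          = min (1 + i) (g.length - (1 + i)) then
        some (((1 + i : Nat) : Int) - 1, ((1 + i : Nat) : Int))
      else none
    rw [hgd, Nat.zero_add, pvBodyB]
    have e1 : 1 + i = i + 1 := by omega
    rw [e1]
    by_cases hR : pvR g (i + 1) = min (i + 1) (g.length - (i + 1))
    · rw [if_pos (hzip.mpr (hRiff.mp hR)), if_pos hR]
      have : ((i + 1 : Nat) : Int) - 1 = (i : Int) := by push_cast; ring
      rw [this]
      push_cast
      ring_nf
    · rw [if_neg ?hzf, if_neg hR]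
      case hzf =>
        intro hcon
        exact hR (hRiff.mpr (hzip.mp hcon))
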